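-- pv_equiv track=rewrite | github.com/grahamiancummins/gdblocks | portfors/deprecated_select.py | _lchild
-- ===== SOURCE A (Python) =====
-- def _lchild(t, z):
--     ii = -1
--     ll = 0
--     for i, tt in enumerate(z):
--         if t.issuperset(tt) and len(t) > len(tt):
--             l = len(tt)
--             if l > ll:
--                 ii = i
--                 ll = l
--     return ii
-- ===== SOURCE B (Python) =====
-- def _lchild(t, z):
--     lens = [len(tt) for tt in z if t.issuperset(tt) and len(t) > len(tt)]
--     best = max(lens, default=0)
--     if best == 0:
--         return -1
--     return next(i for i, tt in enumerate(z) if len(tt) == best and t.issuperset(tt))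
-- ===== Notes on version B (the rewrite author's own statement) =====
-- stated objective: alternative
-- what changed: A's single indexed pass carrying a running (best-index, best-length) state is replaced by a two-phase decomposition: first compute the best qualifying subset length via a comprehension and max(..., default=0), then return the first index whose set has exactly that length and is a subset of t (or -1 when no positive best exists).
import Mathlib
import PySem

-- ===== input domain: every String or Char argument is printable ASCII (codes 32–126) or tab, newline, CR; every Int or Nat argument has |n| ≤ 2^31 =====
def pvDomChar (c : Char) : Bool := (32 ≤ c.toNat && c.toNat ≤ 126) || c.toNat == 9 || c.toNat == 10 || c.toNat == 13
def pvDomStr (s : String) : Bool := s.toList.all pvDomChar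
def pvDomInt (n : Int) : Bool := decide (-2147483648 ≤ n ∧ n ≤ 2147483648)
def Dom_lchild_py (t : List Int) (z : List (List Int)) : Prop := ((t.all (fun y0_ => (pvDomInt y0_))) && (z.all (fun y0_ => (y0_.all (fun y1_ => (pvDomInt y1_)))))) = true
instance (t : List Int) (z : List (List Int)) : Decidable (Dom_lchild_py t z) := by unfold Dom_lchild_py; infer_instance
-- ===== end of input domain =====

-- B replaces A's single running-max pass by filter-lengths + max, then a find-first pass
-- for that best length (objective: alternative decomposition, same asymptotic cost).

-- t.issuperset(tt): every element of tt is in t (both are Python sets, lists of distinct ints)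
def pyIssuperset (t tt : List Int) : Bool := tt.all (fun x => t.contains x)

-- ===== PORT A =====
-- the for-loop over enumerate(z) with state (ii, ll), index i carried explicitly
def lchildLoop (t : List Int) (ii ll i : Int) : List (List Int) → Int
  | [] => ii
  | tt :: rest =>
    if pyIssuperset t tt && decide (tt.length < t.length) then
      (let l : Int := tt.length
       if l > ll then lchildLoop t i l (i + 1) rest
       else lchildLoop t ii ll (i + 1) rest)
    else lchildLoop t ii ll (i + 1) rest

def lchild_py (t : List Int) (z : List (List Int)) : Int := lchildLoop t (-1) 0 0 z

-- ===== PORT B =====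
-- next(i for i, tt in enumerate(z) if len(tt) == best and t.issuperset(tt));
-- the [] case is unreachable when best is realized in z (Python's next always finds a match)
def lchildFind (t : List Int) (best i : Int) : List (List Int) → Int
  | [] => -1
  | tt :: rest =>
    if decide ((tt.length : Int) = best) && pyIssuperset t tt then i
    else lchildFind t best (i + 1) rest

def lchild_py_alt (t : List Int) (z : List (List Int)) : Int :=
  let lens := (z.filter (fun tt => pyIssuperset t tt && decide (tt.length < t.length))).map
    (fun tt => (tt.length : Int))
  let best := PySem.List.maxD lens (fun x => x) 0   -- max(lens, default=0)
  if best = 0 then -1 else lchildFind t best 0 z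

-- ===== PRECONDITION & SPEC =====
def Spec_lchild_py (t : List Int) (z : List (List Int)) (out : Int) : Prop := out = lchild_py_alt t z
instance (t : List Int) (z : List (List Int)) (out : Int) : Decidable (Spec_lchild_py t z out) := by unfold Spec_lchild_py; infer_instance

-- ===== CLAIM (what is proved, stated in full; the proofs are below) =====
def Claim_equal_lchild_py : Prop := ∀ (t : List Int) (z : List (List Int)), Dom_lchild_py t z → Spec_lchild_py t z (lchild_py t z)

-- ===== LEMMAS AND PROOFS =====

-- the maximum qualifying length in z (0 if none), as a structural recursion
def bestLen (t : List Int) : List (List Int) → Int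
  | [] => 0
  | tt :: rest =>
    if pyIssuperset t tt && decide (tt.length < t.length) then
      max (tt.length : Int) (bestLen t rest)
    else bestLen t rest

theorem bestLen_nonneg (t : List Int) (z : List (List Int)) : 0 ≤ bestLen t z := by
  induction z with
  | nil => simp [bestLen]
  | cons tt rest ih =>
    simp only [bestLen]
    split <;> omega

theorem bestLen_lt (t : List Int) (z : List (List Int)) (h : 0 < bestLen t z) :
    bestLen t z < (t.length : Int) := by
  induction z with
  | nil => simp [bestLen] at h
  | cons tt rest ih =>
    simp only [bestLen] at h ⊢
    by_cases hq : (pyIssuperset t tt && decide (tt.length < t.length)) = true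
    · simp only [hq, if_true] at h ⊢
      simp only [Bool.and_eq_true, decide_eq_true_eq] at hq
      by_cases h0 : bestLen t rest ≤ 0
      · simp only [max_lt_iff]; constructor <;> omega
      · have := ih (by omega)
        simp only [max_lt_iff]; constructor <;> omega
    · simp only [hq] at h ⊢
      exact ih h

-- A's loop, started at any state (ii, ll, i) with 0 ≤ ll, returns the first index (from i)
-- whose length equals the maximum qualifying length if that beats ll, else ii.
theorem lchildLoop_eq (t : List Int) (z : List (List Int)) :
    ∀ (ii ll i : Int), 0 ≤ ll →
      lchildLoop t ii ll i z =
        if ll < bestLen t z then lchildFind t (bestLen t z) i z else ii := by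
  induction z with
  | nil =>
    intro ii ll i hll
    simp only [lchildLoop, bestLen]
    rw [if_neg (by omega)]
  | cons tt rest ih =>
    intro ii ll i hll
    simp only [lchildLoop, bestLen]
    by_cases hq : (pyIssuperset t tt && decide (tt.length < t.length)) = true
    · have hq' := hq
      simp only [Bool.and_eq_true, decide_eq_true_eq] at hq'
      simp only [hq, if_true]
      by_cases hgt : ((tt.length : Int) > ll)
      · rw [if_pos hgt, ih i (tt.length : Int) (i + 1) (by positivity)]
        by_cases hle : bestLen t rest ≤ (tt.length : Int)
        · -- head realizes the max
          have hmax : max (tt.length : Int) (bestLen t rest) = (tt.length : Int) := by omega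
          rw [if_neg (by omega), hmax, if_pos (by omega)]
          simp only [lchildFind, decide_true, hq'.1, Bool.and_self, if_pos]
        · -- max comes from the tail
          have hlt : (tt.length : Int) < bestLen t rest := by omega
          have hmax : max (tt.length : Int) (bestLen t rest) = bestLen t rest := by omega
          rw [if_pos hlt, hmax, if_pos (by omega)]
          simp only [lchildFind]
          rw [if_neg (by simp; omega)]
      · rw [if_neg hgt, ih ii ll (i + 1) hll]
        by_cases hle : bestLen t rest ≤ ll
        · have : ¬ (ll < max (tt.length : Int) (bestLen t rest)) := by omega
          rw [if_neg (by omega), if_neg this]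
        · have hlt : ll < bestLen t rest := by omega
          have hmax : max (tt.length : Int) (bestLen t rest) = bestLen t rest := by omega
          rw [if_pos hlt, hmax, if_pos (by omega)]
          simp only [lchildFind]
          rw [if_neg (by simp; omega)]
    · have hq0 : (pyIssuperset t tt && decide (tt.length < t.length)) = false := by
        simpa using hq
      simp only [hq0, Bool.false_eq_true, if_false]
      rw [ih ii ll (i + 1) hll]
      by_cases hlt : ll < bestLen t rest
      · rw [if_pos hlt, if_pos hlt]
        simp only [lchildFind]
        rw [if_neg ?_]
        simp only [Bool.and_eq_true, decide_eq_true_eq, not_and]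
        intro hlen hsup
        -- superset with tt.length = bestLen rest < t.length would make tt qualify
        have hbig : bestLen t rest < (t.length : Int) := bestLen_lt t rest (by omega)
        exfalso
        apply hq
        simp only [Bool.and_eq_true, decide_eq_true_eq]
        exact ⟨hsup, by omega⟩
      · rw [if_neg hlt, if_neg hlt]

-- foldl max over a list, started at a nonnegative accumulator, equals max of acc and foldr max 0
theorem foldl_max_eq (l : List Int) : ∀ a : Int, 0 ≤ a →
    l.foldl max a = max a (l.foldr max 0) := by
  induction l with
  | nil => intro a ha; simp; omega
  | cons x xs ih =>
    intro a ha
    simp only [List.foldl_cons, List.foldr_cons]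
    rw [ih (max a x) (by omega)]
    omega

-- max(lens, default=0) coincides with the structural maximum bestLen
theorem maxD_eq_bestLen (t : List Int) (z : List (List Int)) :
    PySem.List.maxD ((z.filter (fun tt => pyIssuperset t tt && decide (tt.length < t.length))).map
      (fun tt => (tt.length : Int))) (fun x => x) 0 = bestLen t z := by
  have hfoldr : ∀ z : List (List Int),
      ((z.filter (fun tt => pyIssuperset t tt && decide (tt.length < t.length))).map
        (fun tt => (tt.length : Int))).foldr max 0 = bestLen t z := by
    intro z
    induction z with
    | nil => simp [bestLen]
    | cons tt rest ih =>
      simp only [List.filter_cons, bestLen]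
      split <;> simp_all
  cases hL : (z.filter (fun tt => pyIssuperset t tt && decide (tt.length < t.length))).map
      (fun tt => (tt.length : Int)) with
  | nil =>
    rw [← hfoldr z, hL]
    rfl
  | cons x xs =>
    have hx : 0 ≤ x := by
      have : x ∈ (z.filter (fun tt => pyIssuperset t tt && decide (tt.length < t.length))).map
          (fun tt => (tt.length : Int)) := by rw [hL]; exact List.mem_cons_self
      rcases List.mem_map.mp this with ⟨tt, _, rfl⟩
      positivity
    rw [← hfoldr z, hL]
    simp only [PySem.List.maxD, PySem.List.max?_id_cons, Option.getD_some, List.foldr_cons]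
    rw [foldl_max_eq xs x hx]

-- ===== VERDICT (by name: the statement is the Claim_ definition above) =====
theorem lchild_py_spec : Claim_equal_lchild_py := by
  intro t z _
  show lchild_py t z = lchild_py_alt t z
  simp only [lchild_py, lchild_py_alt, maxD_eq_bestLen]
  rw [lchildLoop_eq t z (-1) 0 0 le_rfl]
  have h0 := bestLen_nonneg t z
  by_cases h : bestLen t z = 0
  · rw [if_neg (by omega), if_pos h]
  · rw [if_pos (by omega), if_neg h]
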